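-- pv_equiv track=rewrite | github.com/Abercus/devianceminingthesis | DevianceMiningPipeline/declaretemplates_data.py | template_chain_precedence
-- ===== SOURCE A (Python) =====
-- def template_chain_precedence(trace, event_set):  # exactly 2 event
--     assert (len(event_set) == 2)
--
--     event_1 = event_set[0]
--     event_2 = event_set[1]
--
--     if event_2 in trace:
--         if event_1 in trace:
--             # Each event1 must instantly be followed by event2
--             event_1_positions = set(trace[event_1])
--             event_2_positions = set(trace[event_2])
--
--             if len(event_1_positions) < len(event_2_positions):
--                 return -1, False  # impossible to fulfill
--
--             # For every pos2, check if pos2-1 is in event1 set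
--             for pos2 in event_2_positions:
--                 if pos2-1 not in event_1_positions:
--                     # Then no possible to preceed!!
--                     return -1, False
--
--             count = len(event_2_positions)
--             return count, False
--         else:
--             return -1, False  # no response for event1
--
--     return 0, True  # todo, vacuity
-- ===== SOURCE B (Python) =====
-- def template_chain_precedence(trace, event_set):  # exactly 2 event
--     assert (len(event_set) == 2)
--     event_1, event_2 = event_set
--
--     if event_2 not in trace:
--         return 0, True  # vacuously satisfied
--     if event_1 not in trace:
--         return -1, False
--
--     # sort the distinct positions and do one merge-style two-pointer scan:
--     # each event_2 position q must find q-1 among the event_1 positions;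
--     # since both lists are strictly increasing, the pointer never backtracks.
--     p1 = sorted(set(trace[event_1]))
--     p2 = sorted(set(trace[event_2]))
--     i = 0
--     for q in p2:
--         while i < len(p1) and p1[i] < q - 1:
--             i += 1
--         if i == len(p1) or p1[i] != q - 1:
--             return -1, False
--         i += 1
--     return len(p2), False
-- ===== Notes on version B (the rewrite author's own statement) =====
-- stated objective: alternative
-- what changed: Replaces hash-set membership tests (plus the cardinality pre-check) with sorting both distinct position lists and a single non-backtracking two-pointer merge scan that matches each event_2 position q with q-1 in the event_1 list.
import Mathlib
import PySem

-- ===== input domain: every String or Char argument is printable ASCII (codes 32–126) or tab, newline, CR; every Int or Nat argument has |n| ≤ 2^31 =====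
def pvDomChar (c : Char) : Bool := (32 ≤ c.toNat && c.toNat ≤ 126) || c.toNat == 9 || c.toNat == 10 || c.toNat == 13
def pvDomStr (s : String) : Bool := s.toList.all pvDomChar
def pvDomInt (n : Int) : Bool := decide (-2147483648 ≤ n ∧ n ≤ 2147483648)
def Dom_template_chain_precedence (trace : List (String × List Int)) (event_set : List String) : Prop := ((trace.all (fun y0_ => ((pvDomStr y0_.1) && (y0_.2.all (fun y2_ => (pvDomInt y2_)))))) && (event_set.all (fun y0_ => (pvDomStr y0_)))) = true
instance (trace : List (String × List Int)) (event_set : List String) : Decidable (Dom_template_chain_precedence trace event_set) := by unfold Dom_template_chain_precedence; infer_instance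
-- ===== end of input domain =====

-- B replaces the hash-set membership scan (and the redundant cardinality pre-check)
-- with sorting the distinct positions and one non-backtracking two-pointer merge scan
-- (alternative algorithm; same result).

-- ===== PORT A =====
-- A's for-loop over the set with an early `return -1` followed by `return count` is
-- order-independent (it returns count iff every element passes), so it is ported as
-- the all-check selecting between the two returns; exact for Python's set iteration.
def template_chain_precedence (trace : List (String × List Int)) (event_set : List String) : Int × Bool :=
  let d := PySem.Dict.mk trace
  let event_1 := PySem.List.pyGetD event_set 0 ""   -- total form; Pre_ gives len(event_set) = 2
  let event_2 := PySem.List.pyGetD event_set 1 ""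
  if d.contains event_2 then
    if d.contains event_1 then
      let event_1_positions := PySem.Set.ofList (d.getD event_1 [])
      let event_2_positions := PySem.Set.ofList (d.getD event_2 [])
      if PySem.Set.len event_1_positions < PySem.Set.len event_2_positions then (-1, false)
      else if event_2_positions.all (fun pos2 => PySem.Set.contains event_1_positions (pos2 - 1)) then
        ((PySem.Set.len event_2_positions : Int), false)
      else (-1, false)
    else (-1, false)
  else (0, true)

-- ===== PORT B =====
-- Source B's for-loop over p2 with the inner `while i < len(p1) and p1[i] < q-1: i += 1`,
-- the `p1[i] != q-1` check and the final `i += 1`: the while loop is dropWhile on the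
-- remaining suffix of p1, the checks and pointer bump are the head match below.
def pvScanB : List Int → List Int → Bool
  | [], _ => true
  | q :: qs, p1 =>
      match p1.dropWhile (fun x => decide (x < q - 1)) with
      | [] => false
      | x :: rest => if x = q - 1 then pvScanB qs rest else false

def template_chain_precedence_alt (trace : List (String × List Int)) (event_set : List String) : Int × Bool :=
  let d := PySem.Dict.mk trace
  let event_1 := PySem.List.pyGetD event_set 0 ""
  let event_2 := PySem.List.pyGetD event_set 1 ""
  if !(d.contains event_2) then (0, true)
  else if !(d.contains event_1) then (-1, false)
  else
    let p1 := PySem.List.sorted (PySem.Set.ofList (d.getD event_1 [])) (fun x => x) false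
    let p2 := PySem.List.sorted (PySem.Set.ofList (d.getD event_2 [])) (fun x => x) false
    if pvScanB p2 p1 then ((p2.length : Int), false) else (-1, false)

-- ===== PRECONDITION & SPEC =====
-- A asserts len(event_set) == 2 (AssertionError otherwise); exactly that is required.
def Pre_template_chain_precedence (trace : List (String × List Int)) (event_set : List String) : Prop := event_set.length = 2
instance (trace : List (String × List Int)) (event_set : List String) : Decidable (Pre_template_chain_precedence trace event_set) := by unfold Pre_template_chain_precedence; infer_instance
def pvWitness_template_chain_precedence : (List (String × List Int)) × List String := ([("a", [0, 2]), ("b", [1, 3])], ["a", "b"])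

def Spec_template_chain_precedence (trace : List (String × List Int)) (event_set : List String) (out : Int × Bool) : Prop := out = template_chain_precedence_alt trace event_set
instance (trace : List (String × List Int)) (event_set : List String) (out : Int × Bool) : Decidable (Spec_template_chain_precedence trace event_set out) := by unfold Spec_template_chain_precedence; infer_instance

-- ===== CLAIM (what is proved, stated in full; the proofs are below) =====
def Claim_equal_template_chain_precedence : Prop := ∀ (trace : List (String × List Int)) (event_set : List String), Dom_template_chain_precedence trace event_set → Pre_template_chain_precedence trace event_set → Spec_template_chain_precedence trace event_set (template_chain_precedence trace event_set)

-- ===== LEMMAS AND PROOFS =====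

-- On a strictly increasing list, dropping the prefix `< c` keeps exactly the elements ≥ c.
lemma dropWhile_sorted_eq_filter (c : Int) : ∀ (l : List Int), l.Pairwise (· < ·) →
    l.dropWhile (fun x => decide (x < c)) = l.filter (fun x => decide (c ≤ x)) := by
  intro l
  induction l with
  | nil => intro _; rfl
  | cons a t ih =>
    intro hp
    rw [List.pairwise_cons] at hp
    by_cases hac : a < c
    · simp only [List.dropWhile_cons, List.filter_cons, hac, decide_true,
        show ¬ (c ≤ a) by omega, decide_false, if_true, if_false]
      exact ih hp.2
    · simp only [List.dropWhile_cons, List.filter_cons, hac, decide_false,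
        show c ≤ a by omega, decide_true, if_false, if_true, Bool.false_eq_true]
      rw [List.filter_eq_self.mpr]
      intro x hx
      have := hp.1 x hx
      simp only [decide_eq_true_eq]; omega

-- The two-pointer merge scan over strictly increasing lists decides exactly the
-- shifted-membership condition A checks per element.
lemma pvScanB_iff : ∀ (p2 p1 : List Int), p1.Pairwise (· < ·) → p2.Pairwise (· < ·) →
    (pvScanB p2 p1 = true ↔ ∀ q ∈ p2, (q - 1) ∈ p1) := by
  intro p2
  induction p2 with
  | nil => intro p1 _ _; simp [pvScanB]
  | cons q qs ih =>
    intro p1 h1 h2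
    rw [List.pairwise_cons] at h2
    have hdw := dropWhile_sorted_eq_filter (q - 1) p1 h1
    have hfp : (p1.filter (fun x => decide (q - 1 ≤ x))).Pairwise (· < ·) :=
      h1.sublist List.filter_sublist
    simp only [pvScanB, hdw]
    cases hf : p1.filter (fun x => decide (q - 1 ≤ x)) with
    | nil =>
      simp only [Bool.false_eq_true, false_iff]
      intro hall
      have hq : (q - 1) ∈ p1.filter (fun x => decide (q - 1 ≤ x)) := by
        rw [List.mem_filter]
        exact ⟨hall q (List.mem_cons_self), by simp⟩
      rw [hf] at hq; exact absurd hq (List.not_mem_nil)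
    | cons x rest =>
      rw [hf] at hfp
      rw [List.pairwise_cons] at hfp
      have hxmem : x ∈ p1 ∧ q - 1 ≤ x := by
        have : x ∈ p1.filter (fun x => decide (q - 1 ≤ x)) := by rw [hf]; exact List.mem_cons_self
        rw [List.mem_filter, decide_eq_true_eq] at this; exact this
      have hmr : (match x :: rest with
        | [] => false
        | y :: r => if y = q - 1 then pvScanB qs r else false) = (if x = q - 1 then pvScanB qs rest else false) := rfl
      rw [hmr]
      by_cases hx : x = q - 1
      · rw [if_pos hx]
        rw [ih rest hfp.2 h2.2]
        constructor
        · intro hall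
          rw [List.forall_mem_cons]
          refine ⟨hx ▸ hxmem.1, fun q' hq' => ?_⟩
          have := hall q' hq'
          have : q' - 1 ∈ p1.filter (fun x => decide (q - 1 ≤ x)) := by
            have hr : x ∈ rest → False := fun hm => absurd (hfp.1 x hm) (lt_irrefl x)
            rw [hf]; exact List.mem_cons_of_mem _ this
          exact List.mem_of_mem_filter (by rw [hf] at this ⊢; exact this)
        · intro hall q' hq'
          have hmem : q' - 1 ∈ p1 := (List.forall_mem_cons.mp hall).2 q' hq'
          have hlt : q < q' := h2.1 q' hq'
          have : q' - 1 ∈ p1.filter (fun x => decide (q - 1 ≤ x)) := by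
            rw [List.mem_filter, decide_eq_true_eq]
            exact ⟨hmem, by omega⟩
          rw [hf, List.mem_cons] at this
          rcases this with h | h
          · exact absurd (h.trans hx) (by omega)
          · exact h
      · rw [if_neg hx]
        simp only [Bool.false_eq_true, false_iff]
        intro hall
        have : (q - 1) ∈ p1.filter (fun x => decide (q - 1 ≤ x)) := by
          rw [List.mem_filter, decide_eq_true_eq]
          exact ⟨hall q List.mem_cons_self, le_refl _⟩
        rw [hf, List.mem_cons] at this
        rcases this with h | h
        · exact hx h.symm
        · have := hfp.1 _ h
          omega

-- When every shifted element of the duplicate-free set p2 lies in p1, p2 is no larger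
-- than p1 — A's cardinality pre-check is implied by the scan's success.
lemma len_le_of_all_shifted_mem (p2 p1 : List Int) (h2 : p2.Nodup)
    (h : p2.all (fun x => PySem.Set.contains p1 (x - 1)) = true) :
    p2.length ≤ p1.length := by
  have hnd : (p2.map (fun x => x - 1)).Nodup :=
    h2.map (fun a b hab => by omega)
  have hsub : (p2.map (fun x => x - 1)) ⊆ p1 := by
    intro y hy
    obtain ⟨x, hx, rfl⟩ := List.mem_map.mp hy
    exact (PySem.Set.contains_iff _ _).mp (List.all_eq_true.mp h x hx)
  simpa using (List.subperm_of_subset hnd hsub).length_le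

-- B's merge scan on sorted(set l2) against sorted(set l1) succeeds exactly when
-- A's per-element membership check over the sets does.
lemma pvScanB_eq_all (l1 l2 : List Int) :
    pvScanB (PySem.List.sorted (PySem.Set.ofList l2) (fun x => x) false)
            (PySem.List.sorted (PySem.Set.ofList l1) (fun x => x) false)
    = (PySem.Set.ofList l2).all (fun pos2 => PySem.Set.contains (PySem.Set.ofList l1) (pos2 - 1)) := by
  rw [Bool.eq_iff_iff,
    pvScanB_iff _ _ (PySem.List.sorted_ofList_pairwise_lt (xs := l1)) (PySem.List.sorted_ofList_pairwise_lt (xs := l2)),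
    List.all_eq_true]
  constructor
  · intro h x hx
    rw [PySem.Set.contains_iff, ← PySem.List.mem_sorted (key := fun x => x) (rev := false)]
    exact h x (by rw [PySem.List.mem_sorted]; exact hx)
  · intro h q hq
    rw [PySem.List.mem_sorted] at hq ⊢
    exact (PySem.Set.contains_iff _ _).mp (h q hq)

-- The two inner branches agree: the merge scan equals A's scan, and the scan's
-- success makes the cardinality pre-check vacuous.
lemma inner_branch_eq (l1 l2 : List Int) :
    (if PySem.Set.len (PySem.Set.ofList l1) < PySem.Set.len (PySem.Set.ofList l2) then ((-1 : Int), false)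
     else if (PySem.Set.ofList l2).all (fun pos2 => PySem.Set.contains (PySem.Set.ofList l1) (pos2 - 1)) then ((PySem.Set.len (PySem.Set.ofList l2) : Int), false)
     else (-1, false))
    = (if pvScanB (PySem.List.sorted (PySem.Set.ofList l2) (fun x => x) false)
               (PySem.List.sorted (PySem.Set.ofList l1) (fun x => x) false)
       then (((PySem.List.sorted (PySem.Set.ofList l2) (fun x => x) false).length : Int), false)
       else (-1, false)) := by
  rw [pvScanB_eq_all, PySem.List.length_sorted]
  by_cases ha : (PySem.Set.ofList l2).all (fun pos2 => PySem.Set.contains (PySem.Set.ofList l1) (pos2 - 1)) = true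
  · have hle := len_le_of_all_shifted_mem _ _ (PySem.Set.nodup_ofList l2) ha
    have hn : ¬ (PySem.Set.len (PySem.Set.ofList l1) < PySem.Set.len (PySem.Set.ofList l2)) := by
      simp only [PySem.Set.len]; omega
    rw [if_neg hn, if_pos ha, if_pos ha]
    rfl
  · simp only [if_neg ha, ite_self]

-- ===== VERDICT (by name: the statement is the Claim_ definition above) =====
theorem template_chain_precedence_spec : Claim_equal_template_chain_precedence := by
  intro trace event_set _ _
  unfold Spec_template_chain_precedence template_chain_precedence template_chain_precedence_alt
  by_cases h2 : (PySem.Dict.mk trace).contains (PySem.List.pyGetD event_set 1 "") = true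
  · by_cases h1 : (PySem.Dict.mk trace).contains (PySem.List.pyGetD event_set 0 "") = true
    · simp only [h1, h2, Bool.not_true, if_true, Bool.false_eq_true, if_false]
      exact inner_branch_eq _ _
    · simp [h1, h2]
  · simp [h2]
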